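-- pv_equiv track=rewrite | github.com/JYandev/Teapot-Wars-2 | objects/tileMap/TileMap.py | convertDungeonFromString
-- ===== SOURCE A (Python) =====
-- def convertDungeonFromString (tileMap, size):
--     """
--         Converts from a dungeon string to a 2D list.
--         Used in network optimization.
--     """
--     new2DList = []
--     for row in range(size):
--         subList = []
--         for col in range(size):
--             subList.append(int(tileMap[row*size+col]))
--         new2DList.append(subList)
--     return new2DList
-- ===== SOURCE B (Python) =====
-- def convertDungeonFromString(tileMap, size):
--     """
--         Converts from a dungeon string to a 2D list.
--         Used in network optimization.
--     """
--     if size <= 0: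
--         return []
--     new2DList = []
--     row = []
--     for ch in tileMap[:size * size]:
--         row.append(int(ch))
--         if len(row) == size:
--             new2DList.append(row)
--             row = []
--     return new2DList
-- ===== Notes on version B (the rewrite author's own statement) =====
-- stated objective: alternative
-- what changed: Replaced the nested row/col loops with row*size+col index arithmetic by a single flat pass over the first size*size characters that accumulates a current row and flushes it into the result each time it reaches length size.
import Mathlib
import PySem

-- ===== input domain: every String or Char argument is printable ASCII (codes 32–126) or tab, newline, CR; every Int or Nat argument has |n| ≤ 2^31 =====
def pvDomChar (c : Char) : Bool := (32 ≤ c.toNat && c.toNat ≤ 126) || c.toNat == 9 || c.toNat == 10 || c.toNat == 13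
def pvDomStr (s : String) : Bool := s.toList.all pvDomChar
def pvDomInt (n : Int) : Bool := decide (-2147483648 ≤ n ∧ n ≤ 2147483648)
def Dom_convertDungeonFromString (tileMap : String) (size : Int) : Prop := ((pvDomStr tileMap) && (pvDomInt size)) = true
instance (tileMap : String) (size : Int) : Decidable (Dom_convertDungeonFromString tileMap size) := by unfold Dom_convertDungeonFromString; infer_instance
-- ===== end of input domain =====

-- B replaces A's nested row/col loops (index row*size+col) by one flat pass over the first
-- size*size characters that flushes a running row each time it reaches length size (objective: alternative).

-- int(c) for a one-character string c; Pre_ guarantees the character is a digit and the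
-- index is in range, so the `getD 0` totalization is never reached on admitted inputs.
def pyIntChar (c : Char) : Int := (PySem.Int.ofChars? [c]).getD 0

-- ===== PORT A =====
def convertDungeonFromString (tileMap : String) (size : Int) : List (List Int) :=
  (PySem.List.pyRange 0 size 1).foldl
    (fun new2DList row =>
      new2DList ++ [(PySem.List.pyRange 0 size 1).foldl
        (fun subList col =>
          subList ++ [pyIntChar ((PySem.List.pyGet? tileMap.toList (row * size + col)).getD ' ')])
        []])
    []

-- ===== PORT B =====
def convertDungeonFromString_alt (tileMap : String) (size : Int) : List (List Int) :=
  if size ≤ 0 then []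
  else
    ((PySem.List.slice tileMap.toList none (some (size * size))).foldl
      (fun (p : List (List Int) × List Int) ch =>
        let row := p.2 ++ [pyIntChar ch]
        if (row.length : Int) = size then (p.1 ++ [row], ([] : List Int)) else (p.1, row))
      ([], [])).1

-- ===== PRECONDITION & SPEC =====
-- Pre_ excludes exactly the inputs where Python A raises: a positive size with fewer than
-- size*size characters (IndexError) or a non-digit among the first size*size characters (ValueError).
def Pre_convertDungeonFromString (tileMap : String) (size : Int) : Prop :=
  size ≤ 0 ∨
    (size * size ≤ (tileMap.toList.length : Int) ∧
      ((tileMap.toList.take (size * size).toNat).all Char.isDigit) = true)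

instance (tileMap : String) (size : Int) : Decidable (Pre_convertDungeonFromString tileMap size) := by
  unfold Pre_convertDungeonFromString; infer_instance

def pvWitness_convertDungeonFromString : String × Int := ("1234", 2)

def Spec_convertDungeonFromString (tileMap : String) (size : Int) (out : List (List Int)) : Prop := out = convertDungeonFromString_alt tileMap size
instance (tileMap : String) (size : Int) (out : List (List Int)) : Decidable (Spec_convertDungeonFromString tileMap size out) := by unfold Spec_convertDungeonFromString; infer_instance

-- ===== CLAIM (what is proved, stated in full; the proofs are below) =====
def Claim_equal_convertDungeonFromString : Prop := ∀ (tileMap : String) (size : Int), Dom_convertDungeonFromString tileMap size → Pre_convertDungeonFromString tileMap size → Spec_convertDungeonFromString tileMap size (convertDungeonFromString tileMap size)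

-- ===== LEMMAS AND PROOFS =====

-- B's flush step, named for the lemmas below.
def altStep (size : Int) (p : List (List Int) × List Int) (ch : Char) : List (List Int) × List Int :=
  let row := p.2 ++ [pyIntChar ch]
  if (row.length : Int) = size then (p.1 ++ [row], ([] : List Int)) else (p.1, row)

-- One chunk: starting with a partial row `cur`, consuming exactly the n - cur.length
-- characters that complete it flushes `cur ++ l.map pyIntChar` and leaves an empty row.
theorem altStep_chunk (n : Nat) (l : List Char) :
    ∀ (cur : List Int) (acc : List (List Int)),
      cur.length + l.length = n → cur.length < n →
      l.foldl (altStep (n : Int)) (acc, cur) = (acc ++ [cur ++ l.map pyIntChar], []) := by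
  induction l with
  | nil => intro cur acc h1 h2; simp at h1; omega
  | cons x t ih =>
    intro cur acc h1 h2
    simp only [List.foldl_cons, altStep]
    by_cases hfull : cur.length + 1 = n
    · have ht : t = [] := by
        have : t.length = 0 := by simp at h1; omega
        exact List.eq_nil_of_length_eq_zero this
      subst ht
      simp only [List.length_append, List.length_cons, List.length_nil]
      rw [if_pos (by exact_mod_cast congrArg Nat.cast hfull)]
      simp
    · have hne : ((cur ++ [pyIntChar x]).length : Int) ≠ (n : Int) := by
        simp only [List.length_append, List.length_cons, List.length_nil]
        exact_mod_cast fun h => hfull (by omega)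
      rw [if_neg hne]
      rw [ih (cur ++ [pyIntChar x]) acc (by simp at h1 ⊢; omega) (by simp; omega)]
      simp

-- Full pass: a list of length k*n (n > 0) folds to k rows of n, back in an empty row.
theorem altStep_full (n : Nat) (hn : 0 < n) :
    ∀ (k : Nat) (l : List Char) (acc : List (List Int)), l.length = k * n →
      l.foldl (altStep (n : Int)) (acc, []) =
        (acc ++ (List.range k).map (fun r => ((l.drop (r * n)).take n).map pyIntChar), []) := by
  intro k
  induction k with
  | zero =>
    intro l acc hl
    have : l = [] := List.eq_nil_of_length_eq_zero (by omega)
    subst this; simp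
  | succ k ih =>
    intro l acc hl
    have hlen : n ≤ l.length := by
      have : (k + 1) * n = k * n + n := by ring
      omega
    have hsplit : l = l.take n ++ l.drop n := (List.take_append_drop n l).symm
    conv_lhs => rw [hsplit]
    rw [List.foldl_append]
    rw [altStep_chunk n (l.take n) [] acc (by simp; omega) (by simp; omega)]
    have h2 : (k + 1) * n = k * n + n := by ring
    rw [ih (l.drop n) _ (by simp only [List.length_drop]; omega)]
    rw [List.range_succ_eq_map, List.map_cons, List.map_map]
    congr 1
    rw [List.append_assoc, List.singleton_append]
    congr 1
    congr 1
    · simp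
    · apply List.map_congr_left
      intro r _
      simp only [Function.comp_apply]
      rw [List.drop_drop]
      have h3 : n + r * n = r.succ * n := by rw [Nat.succ_mul]; omega
      rw [h3]

-- ===== VERDICT (by name: the statement is the Claim_ definition above) =====
theorem convertDungeonFromString_spec : Claim_equal_convertDungeonFromString := by
  intro tileMap size _hdom hpre
  unfold Spec_convertDungeonFromString convertDungeonFromString convertDungeonFromString_alt
  by_cases hsz : size ≤ 0
  · rw [if_pos hsz]
    have : PySem.List.pyRange 0 size 1 = [] := by
      rw [PySem.List.pyRange_zero]
      have : size.toNat = 0 := by omega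
      simp [this]
    rw [this]; simp
  · rw [if_neg hsz]
    replace hsz : 0 < size := lt_of_not_ge hsz
    obtain ⟨hlen, _hdig⟩ := hpre.resolve_left (by omega)
    set n : Nat := size.toNat with hn
    have hsize : size = (n : Int) := by omega
    have hnpos : 0 < n := by omega
    set chars := tileMap.toList with hchars
    have hlenN : n * n ≤ chars.length := by
      have : ((n : Int)) * n ≤ (chars.length : Int) := by rw [← hsize]; exact hlen
      exact_mod_cast this
    -- B side
    have hslice : PySem.List.slice chars none (some (size * size)) = chars.take (n * n) := by
      rw [hsize]
      exact_mod_cast PySem.List.slice_to_natCast chars (n * n)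
    have hfold :
        ((PySem.List.slice chars none (some (size * size))).foldl
          (fun (p : List (List Int) × List Int) ch =>
            let row := p.2 ++ [pyIntChar ch]
            if (row.length : Int) = size then (p.1 ++ [row], ([] : List Int)) else (p.1, row))
          ([], [])).1 =
        (List.range n).map
          (fun r => (((chars.take (n * n)).drop (r * n)).take n).map pyIntChar) := by
      rw [hslice]
      have := altStep_full n hnpos n (chars.take (n * n)) []
        (by simp [List.length_take]; omega)
      rw [hsize]
      have heq :
          (fun (p : List (List Int) × List Int) ch =>
            let row := p.2 ++ [pyIntChar ch]
            if (row.length : Int) = (n : Int) then (p.1 ++ [row], ([] : List Int)) else (p.1, row))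
          = altStep (n : Int) := rfl
      rw [heq, this]
      simp
    rw [hfold]
    -- A side
    rw [PySem.List.pyRange_zero]
    rw [hsize]
    simp only [Int.toNat_natCast]
    rw [List.foldl_map, PySem.List.foldl_append_singleton_eq_map]
    simp only [List.nil_append]
    apply List.map_congr_left
    intro r hr
    rw [List.mem_range] at hr
    rw [List.foldl_map, PySem.List.foldl_append_singleton_eq_map]
    simp only [List.nil_append]
    -- both rows have length n; compare elementwise
    have hrow : ((chars.take (n * n)).drop (r * n)).take n = (chars.drop (r * n)).take n := by
      rw [List.drop_take]
      have h1 : n ⊓ (n * n - r * n) = n := by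
        have : r * n + n ≤ n * n := by nlinarith
        omega
      rw [List.take_take, h1]
    rw [hrow]
    have hbound : r * n + n ≤ chars.length := by nlinarith
    apply List.ext_getElem
    · simp [List.length_take, List.length_drop]; omega
    · intro c hc1 hc2
      simp only [List.getElem_map, List.getElem_take, List.getElem_drop, List.getElem_range]
      have hcn : c < n := by simpa using hc1
      have hidx : (r : Int) * n + (c : Int) = ((r * n + c : Nat) : Int) := by push_cast; ring
      rw [hidx, PySem.List.pyGet?_natCast]
      have hlt : r * n + c < chars.length := by omega
      rw [List.getElem?_eq_getElem hlt]
      simp
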